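-- pv_equiv track=rewrite | github.com/devinpowers/cse231project6 | Project_6.py | off_side_shooter
-- ===== SOURCE A (Python) =====
-- def off_side_shooter(master_list):
--
--     left_wing_shoots_right = 0
--     right_wing_shoots_left = 0
--
--     for line in master_list:
--         left_or_right = line[1]
--         position = line[2]
--
--         for line in left_or_right and position:
--             if left_or_right == 'R'and position == 'L':
--                 left_wing_shoots_right += 1
--             if left_or_right == 'L' and position == 'R':
--                 right_wing_shoots_left +=1
--
--     return left_wing_shoots_right, right_wing_shoots_left
-- ===== SOURCE B (Python) =====
-- def off_side_shooter(master_list):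
--     left_wing_shoots_right = sum(
--         1 for line in master_list if line[1] == 'R' and line[2] == 'L')
--     right_wing_shoots_left = sum(
--         1 for line in master_list if line[1] == 'L' and line[2] == 'R')
--     return left_wing_shoots_right, right_wing_shoots_left
-- ===== Notes on version B (the rewrite author's own statement) =====
-- stated objective: simpler
-- what changed: Replaced the nested per-character loop with accumulator mutation by two flat counting comprehensions (one per direction); the inner character loop only ever fired when the position string was the single character 'L' or 'R', so each matching line contributes exactly 1.
import Mathlib
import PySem

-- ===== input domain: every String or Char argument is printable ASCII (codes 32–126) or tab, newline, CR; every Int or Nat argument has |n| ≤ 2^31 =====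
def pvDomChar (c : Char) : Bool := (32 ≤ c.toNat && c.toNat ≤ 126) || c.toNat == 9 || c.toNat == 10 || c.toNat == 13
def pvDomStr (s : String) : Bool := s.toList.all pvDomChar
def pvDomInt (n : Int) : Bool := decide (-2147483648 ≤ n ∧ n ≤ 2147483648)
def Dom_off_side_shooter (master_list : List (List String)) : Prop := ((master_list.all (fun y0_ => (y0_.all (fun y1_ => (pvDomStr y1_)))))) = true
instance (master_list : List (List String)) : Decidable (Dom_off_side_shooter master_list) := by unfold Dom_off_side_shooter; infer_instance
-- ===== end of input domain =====

-- B replaces A's nested per-character loop and mutable pair with two flat counting passes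
-- (objective: simpler); equivalence holds because A's inner loop only increments when the
-- position string is the single character 'L' or 'R'.

-- ===== PORT A =====
-- literal transliteration of A: outer fold over the roster, inner fold over the characters
-- of `left_or_right and position` (Python's `and` on strings: '' is falsy).
def off_side_shooter (master_list : List (List String)) : Int × Int :=
  master_list.foldl (fun acc line =>
    let left_or_right := (PySem.List.pyGet? line 1).getD ""
    let position := (PySem.List.pyGet? line 2).getD ""
    let s := if left_or_right = "" then left_or_right else position
    s.toList.foldl (fun a _ =>
      let a := if left_or_right = "R" ∧ position = "L" then (a.1 + 1, a.2) else a
      if left_or_right = "L" ∧ position = "R" then (a.1, a.2 + 1) else a) acc) (0, 0)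

-- ===== PORT B =====
-- transliteration of Source B: two counting comprehensions, one per direction.
def off_side_shooter_alt (master_list : List (List String)) : Int × Int :=
  ((master_list.countP (fun line =>
      (PySem.List.pyGet? line 1).getD "" == "R" && (PySem.List.pyGet? line 2).getD "" == "L") : Int),
   (master_list.countP (fun line =>
      (PySem.List.pyGet? line 1).getD "" == "L" && (PySem.List.pyGet? line 2).getD "" == "R") : Int))

-- ===== PRECONDITION & SPEC =====
-- Python A raises IndexError on line[1]/line[2] when a row has fewer than 3 entries.
def Pre_off_side_shooter (master_list : List (List String)) : Prop :=
  ∀ line ∈ master_list, 3 ≤ line.length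
instance (master_list : List (List String)) : Decidable (Pre_off_side_shooter master_list) := by unfold Pre_off_side_shooter; infer_instance
def pvWitness_off_side_shooter : List (List String) := [["Ann", "R", "L"], ["Bob", "L", "R"], ["Cal", "L", "L"]]

def Spec_off_side_shooter (master_list : List (List String)) (out : Int × Int) : Prop := out = off_side_shooter_alt master_list
instance (master_list : List (List String)) (out : Int × Int) : Decidable (Spec_off_side_shooter master_list out) := by unfold Spec_off_side_shooter; infer_instance

-- ===== CLAIM (what is proved, stated in full; the proofs are below) =====
def Claim_equal_off_side_shooter : Prop := ∀ (master_list : List (List String)), Dom_off_side_shooter master_list → Pre_off_side_shooter master_list → Spec_off_side_shooter master_list (off_side_shooter master_list)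

-- ===== LEMMAS AND PROOFS =====

-- the inner character loop is the identity when neither guard can fire
theorem inner_id (lr pos : String) (cs : List Char) (acc : Int × Int)
    (h1 : ¬ (lr = "R" ∧ pos = "L")) (h2 : ¬ (lr = "L" ∧ pos = "R")) :
    cs.foldl (fun a _ =>
      let a := if lr = "R" ∧ pos = "L" then (a.1 + 1, a.2) else a
      if lr = "L" ∧ pos = "R" then (a.1, a.2 + 1) else a) acc = acc := by
  induction cs generalizing acc with
  | nil => rfl
  | cons c cs ih =>
    simp [List.foldl, h1, h2]

theorem fold_eq_count (master_list : List (List String)) (acc : Int × Int)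
    (hpre : ∀ line ∈ master_list, 3 ≤ line.length) :
    master_list.foldl (fun acc line =>
      let left_or_right := (PySem.List.pyGet? line 1).getD ""
      let position := (PySem.List.pyGet? line 2).getD ""
      let s := if left_or_right = "" then left_or_right else position
      s.toList.foldl (fun a _ =>
        let a := if left_or_right = "R" ∧ position = "L" then (a.1 + 1, a.2) else a
        if left_or_right = "L" ∧ position = "R" then (a.1, a.2 + 1) else a) acc) acc
    = (acc.1 + (master_list.countP (fun line =>
          (PySem.List.pyGet? line 1).getD "" == "R" && (PySem.List.pyGet? line 2).getD "" == "L") : Int),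
       acc.2 + (master_list.countP (fun line =>
          (PySem.List.pyGet? line 1).getD "" == "L" && (PySem.List.pyGet? line 2).getD "" == "R") : Int)) := by
  induction master_list generalizing acc with
  | nil => simp
  | cons line rest ih =>
    have hlen : 3 ≤ line.length := hpre line (by simp)
    match line, hlen with
    | a :: b :: c :: t, _ =>
      have hrest : ∀ l ∈ rest, 3 ≤ l.length := fun l hl => hpre l (by simp [hl])
      rw [List.foldl_cons, ih _ hrest]
      have hg1 : (PySem.List.pyGet? (a :: b :: c :: t) 1).getD "" = b := by
        simp [PySem.List.pyGet?, PySem.List.pyIdx?, show (0:Int) ≤ (t.length:Int) + 1 from by omega]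
      have hg2 : (PySem.List.pyGet? (a :: b :: c :: t) 2).getD "" = c := by
        simp [PySem.List.pyGet?, PySem.List.pyIdx?, show (2:Int) ≤ (t.length:Int) + 1 + 1 from by omega]
      simp only [hg1, hg2, List.countP_cons]
      by_cases h1 : b = "R" ∧ c = "L"
      · obtain ⟨hb, hc⟩ := h1
        subst hb hc
        simp [List.foldl]
        omega
      · by_cases h2 : b = "L" ∧ c = "R"
        · obtain ⟨hb, hc⟩ := h2
          subst hb hc
          simp [List.foldl]
          omega
        · rw [inner_id _ _ _ _ h1 h2]
          have e1 : ((b == "R") && (c == "L")) = false := by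
            simp only [Bool.and_eq_false_iff, beq_eq_false_iff_ne]; tauto
          have e2 : ((b == "L") && (c == "R")) = false := by
            simp only [Bool.and_eq_false_iff, beq_eq_false_iff_ne]; tauto
          simp [e1, e2]

-- ===== VERDICT (by name: the statement is the Claim_ definition above) =====
theorem off_side_shooter_spec : Claim_equal_off_side_shooter := by
  intro ml _ hpre
  unfold Spec_off_side_shooter off_side_shooter off_side_shooter_alt
  rw [fold_eq_count ml (0, 0) hpre]
  simp
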